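-- pv_equiv track=rewrite | github.com/edwinyyyu/MemMachine | evaluation/associative_recall/full_pipeline.py | parse_gaps
-- ===== SOURCE A (Python) =====
-- def parse_gaps(response: str) -> list[str]:
--     gaps = []
--     for line in response.strip().split("\n"):
--         line = line.strip()
--         if line.startswith("GAP:"):
--             gap = line[4:].strip()
--             if gap:
--                 gaps.append(gap)
--     return gaps
-- ===== SOURCE B (Python) =====
-- def parse_gaps(response: str) -> list[str]:
--     # One streaming pass over the characters: accumulate the current line in a
--     # buffer and emit a gap whenever a newline (or the end) closes a GAP: line.
--     gaps = []
--     line = ""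
--     for ch in response.strip() + "\n":
--         if ch == "\n":
--             s = line.strip()
--             if s.startswith("GAP:"):
--                 gap = s[4:].strip()
--                 if gap:
--                     gaps.append(gap)
--             line = ""
--         else:
--             line = line + ch
--     return gaps
-- ===== Notes on version B (the rewrite author's own statement) =====
-- stated objective: alternative
-- what changed: B replaces A's split-into-lines-then-loop with a single streaming character pass that maintains a line buffer and emits a gap each time a newline closes a GAP: line.
import Mathlib
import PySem

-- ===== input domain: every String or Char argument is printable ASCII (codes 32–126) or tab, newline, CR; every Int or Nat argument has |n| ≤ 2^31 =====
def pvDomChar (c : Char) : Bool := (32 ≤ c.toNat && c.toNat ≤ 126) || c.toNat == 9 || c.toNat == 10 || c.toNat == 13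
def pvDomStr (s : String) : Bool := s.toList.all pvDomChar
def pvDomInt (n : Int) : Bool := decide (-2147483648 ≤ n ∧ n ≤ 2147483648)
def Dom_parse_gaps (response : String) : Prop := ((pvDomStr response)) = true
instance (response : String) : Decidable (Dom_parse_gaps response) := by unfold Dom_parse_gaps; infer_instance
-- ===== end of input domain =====

-- B is a single streaming character pass (line buffer + emit on newline) instead of A's
-- split-into-lines-then-loop; same cost, different traversal (objective: alternative).

-- ===== PORT A =====
-- A's loop body over one line, kept as a named helper
def aStep (gaps : List String) (line : String) : List String :=
  let line := PySem.Str.strip line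
  if PySem.Str.startswith line "GAP:" then
    let gap := PySem.Str.strip (PySem.Str.slice line (some 4) none)
    if gap ≠ "" then gaps ++ [gap] else gaps
  else gaps

def parse_gaps (response : String) : List String :=
  ((PySem.Chars.splitOn (PySem.Str.strip response).toList "\n".toList).map String.ofList).foldl
    aStep []

-- ===== PORT B =====
-- B's loop body over one character, kept as a named helper
def bStep (st : List String × List Char) (ch : Char) : List String × List Char :=
  if ch = '\n' then
    let s := PySem.Chars.strip st.2
    if PySem.Chars.startswith s "GAP:".toList then
      let gap := PySem.Chars.strip (PySem.Chars.slice s (some 4) none)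
      if gap ≠ [] then (st.1 ++ [String.ofList gap], ([] : List Char)) else (st.1, [])
    else (st.1, [])
  else (st.1, st.2 ++ [ch])

def parse_gaps_alt (response : String) : List String :=
  (((PySem.Str.strip response).toList ++ ['\n']).foldl bStep ([], [])).1

-- ===== PRECONDITION & SPEC =====
def Spec_parse_gaps (response : String) (out : List String) : Prop := out = parse_gaps_alt response
instance (response : String) (out : List String) : Decidable (Spec_parse_gaps response out) := by unfold Spec_parse_gaps; infer_instance

-- ===== CLAIM (what is proved, stated in full; the proofs are below) =====
def Claim_equal_parse_gaps : Prop := ∀ (response : String), Dom_parse_gaps response → Spec_parse_gaps response (parse_gaps response)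

-- ===== LEMMAS AND PROOFS =====

-- the 0-or-1 gaps contributed by one line: the shared characterisation of both programs
def gapOf (l : List Char) : List String :=
  let s := PySem.Chars.strip l
  if PySem.Chars.startswith s "GAP:".toList then
    let gap := PySem.Chars.strip (PySem.Chars.slice s (some 4) none)
    if gap ≠ [] then [String.ofList gap] else []
  else []

-- split on '\n', structurally (what PySem.Chars.splitOn computes for the separator "\n")
def linesNL : List Char → List (List Char)
  | [] => [[]]
  | c :: rest => if c = '\n' then [] :: linesNL rest else (linesNL rest).modifyHead (c :: ·)

theorem linesNL_ne_nil (l : List Char) : linesNL l ≠ [] := by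
  induction l with
  | nil => simp [linesNL]
  | cons c rest ih =>
    simp only [linesNL]
    split_ifs
    · simp
    · cases h : linesNL rest with
      | nil => exact absurd h ih
      | cons a t => simp

theorem go_spec (l : List Char) : ∀ (fuel : Nat) (cur : List Char) (acc : List (List Char)),
    l.length < fuel →
    PySem.Chars.splitOn.go ['\n'] fuel l cur acc
      = acc.reverse ++ (linesNL l).modifyHead (cur.reverse ++ ·) := by
  induction l with
  | nil =>
    intro fuel cur acc h
    cases fuel with
    | zero => omega
    | succ f => rw [PySem.Chars.splitOn.go.eq_def]; simp [linesNL]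
  | cons c rest ih =>
    intro fuel cur acc h
    cases fuel with
    | zero => omega
    | succ f =>
      rw [PySem.Chars.splitOn.go.eq_def]
      by_cases hc : c = '\n'
      · subst hc
        simp only [List.isPrefixOf, beq_self_eq_true, Bool.true_and,
          if_pos, List.length_cons, List.length_nil, List.drop_succ_cons, List.drop_zero]
        rw [ih f [] (cur.reverse :: acc) (by simp at h; omega)]
        simp only [linesNL, if_pos]
        cases linesNL rest <;> simp
      · have hcond : List.isPrefixOf ['\n'] (c :: rest) = false := by
          simp [List.isPrefixOf]
          intro hh
          exact absurd hh.symm hc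
        simp only [hcond, Bool.false_eq_true, if_neg, not_false_iff]
        rw [ih f (c :: cur) acc (by simp at h; omega)]
        simp only [linesNL, if_neg hc]
        cases hlr : linesNL rest with
        | nil => exact absurd hlr (linesNL_ne_nil rest)
        | cons a t => simp

theorem splitOn_eq_linesNL (l : List Char) :
    PySem.Chars.splitOn l ['\n'] = linesNL l := by
  unfold PySem.Chars.splitOn
  rw [go_spec l (l.length + 1) [] [] (by omega)]
  cases h : linesNL l with
  | nil => exact absurd h (linesNL_ne_nil l)
  | cons a t => simp

theorem linesNL_no_nl (buf : List Char) (h : '\n' ∉ buf) : linesNL buf = [buf] := by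
  induction buf with
  | nil => rfl
  | cons c rest ih =>
    simp only [List.mem_cons, not_or] at h
    simp [linesNL, Ne.symm h.1, ih h.2]

theorem linesNL_append (buf cs : List Char) (h : '\n' ∉ buf) :
    linesNL (buf ++ '\n' :: cs) = buf :: linesNL cs := by
  induction buf with
  | nil => simp [linesNL]
  | cons c rest ih =>
    simp only [List.mem_cons, not_or] at h
    simp [linesNL, Ne.symm h.1, ih h.2]

-- A's per-line step appends gapOf of the line
theorem aStep_eq (gaps : List String) (l : List Char) :
    aStep gaps (String.ofList l) = gaps ++ gapOf l := by
  simp only [aStep, gapOf, PySem.Str.strip, PySem.Str.slice, PySem.Str.startswith,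
    String.toList_ofList]
  split_ifs with h1 h2 h3 <;> simp_all

theorem a_foldl (lines : List (List Char)) (acc : List String) :
    (lines.map String.ofList).foldl aStep acc = acc ++ lines.flatMap gapOf := by
  induction lines generalizing acc with
  | nil => simp
  | cons l rest ih =>
    simp only [List.map_cons, List.foldl_cons, List.flatMap_cons]
    rw [aStep_eq acc l, ih]
    simp

-- B's newline step flushes the buffer through gapOf
theorem bStep_newline (acc : List String) (buf : List Char) :
    bStep (acc, buf) '\n' = (acc ++ gapOf buf, []) := by
  simp only [bStep, gapOf]
  split_ifs <;> simp

theorem b_loop (cs : List Char) : ∀ (buf : List Char) (acc : List String), '\n' ∉ buf →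
    (cs ++ ['\n']).foldl bStep (acc, buf)
      = (acc ++ (linesNL (buf ++ cs)).flatMap gapOf, []) := by
  induction cs with
  | nil =>
    intro buf acc h
    simp only [List.nil_append, List.foldl_cons, List.foldl_nil, List.append_nil]
    rw [bStep_newline, linesNL_no_nl buf h]
    simp
  | cons c rest ih =>
    intro buf acc h
    by_cases hc : c = '\n'
    · subst hc
      simp only [List.cons_append, List.foldl_cons]
      rw [bStep_newline, ih [] (acc ++ gapOf buf) (by simp), linesNL_append buf rest h]
      simp
    · simp only [List.cons_append, List.foldl_cons]
      have hstep : bStep (acc, buf) c = (acc, buf ++ [c]) := by simp [bStep, hc]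
      rw [hstep, ih (buf ++ [c]) acc (by simp [h, Ne.symm hc])]
      simp

theorem parse_gaps_eq_alt (r : String) : parse_gaps r = parse_gaps_alt r := by
  have hs : ("\n".toList : List Char) = ['\n'] := rfl
  unfold parse_gaps parse_gaps_alt
  rw [hs]
  rw [splitOn_eq_linesNL]
  rw [a_foldl]
  rw [b_loop (PySem.Str.strip r).toList [] [] (by simp)]
  simp

-- ===== VERDICT (by name: the statement is the Claim_ definition above) =====
theorem parse_gaps_spec : Claim_equal_parse_gaps := by
  intro response _
  show parse_gaps response = parse_gaps_alt response
  exact parse_gaps_eq_alt response
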